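-- pv_equiv track=rewrite | github.com/HoseaKim1025/My_Repo | Daily/0208/4869.py | paper
-- ===== SOURCE A (Python) =====
-- def paper(n):
--     ans = 1
--     cnt = 1
--     while cnt < n//10:
--         cnt += 1
--         if cnt % 2 == 0:
--             ans = ans * 2 + 1
--         else:
--             ans = ans * 2 - 1
--
--     return ans
-- ===== SOURCE B (Python) =====
-- def paper(n):
--     m = n // 10
--     if m < 0:
--         return 1
--     return (2 ** (m + 1) + (-1) ** m) // 3
-- ===== Notes on version B (the rewrite author's own statement) =====
-- stated objective: faster
-- what changed: Replaced the n//10-step doubling loop by the closed form (2^(m+1)+(-1)^m)//3 with m=n//10 (and 1 for m<0).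
import Mathlib
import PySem

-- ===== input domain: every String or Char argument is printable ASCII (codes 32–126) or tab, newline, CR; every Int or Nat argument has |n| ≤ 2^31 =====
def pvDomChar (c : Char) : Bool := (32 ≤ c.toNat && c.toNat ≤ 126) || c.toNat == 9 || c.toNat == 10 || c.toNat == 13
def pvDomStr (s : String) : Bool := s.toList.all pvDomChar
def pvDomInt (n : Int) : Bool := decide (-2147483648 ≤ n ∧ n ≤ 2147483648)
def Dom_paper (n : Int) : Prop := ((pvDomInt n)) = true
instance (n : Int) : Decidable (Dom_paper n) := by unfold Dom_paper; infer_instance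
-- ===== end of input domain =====

-- B replaces A's n//10-step doubling loop by the closed form (2^(m+1)+(-1)^m)//3, m = n//10 (asymptotically faster).

-- ===== PORT A =====
-- literal port of A's while-loop: 'fuel' = remaining iterations, counted down from n//10 - 1
def paperLoop : Nat → Int → Int → Int
  | 0, _, ans => ans
  | fuel + 1, cnt, ans =>
    paperLoop fuel (cnt + 1) (if (cnt + 1) % 2 == 0 then ans * 2 + 1 else ans * 2 - 1)

def paper (n : Int) : Int :=
  paperLoop (PySem.Int.floordiv n 10 - 1).toNat 1 1

-- ===== PORT B =====
def paper_alt (n : Int) : Int :=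
  let m := PySem.Int.floordiv n 10
  if m < 0 then 1
  else PySem.Int.floordiv (2 ^ (m + 1).toNat + (-1) ^ m.toNat) 3

-- ===== PRECONDITION & SPEC =====
def Spec_paper (n : Int) (out : Int) : Prop := out = paper_alt n
instance (n : Int) (out : Int) : Decidable (Spec_paper n out) := by unfold Spec_paper; infer_instance

-- ===== CLAIM (what is proved, stated in full; the proofs are below) =====
def Claim_equal_paper : Prop := ∀ (n : Int), Dom_paper n → Spec_paper n (paper n)

-- ===== LEMMAS AND PROOFS =====

-- the loop's state as a function of the step index
def cSeq : Nat → Int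
  | 0 => 1
  | k + 1 => if (k + 1) % 2 == 0 then cSeq k * 2 + 1 else cSeq k * 2 - 1

lemma paperLoop_cSeq (fuel k : Nat) :
    paperLoop fuel (k : Int) (cSeq k) = cSeq (k + fuel) := by
  induction fuel generalizing k with
  | zero => simp [paperLoop]
  | succ f ih =>
    have hpar : ((k : Int) + 1) % 2 == 0 ↔ ((k + 1) % 2 == 0) := by
      constructor <;> intro h <;> [skip; skip] <;>
        · simp only [beq_iff_eq] at h ⊢; omega
    have : paperLoop (f + 1) (k : Int) (cSeq k)
        = paperLoop f ((k + 1 : Nat) : Int) (cSeq (k + 1)) := by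
      simp only [paperLoop, cSeq]
      by_cases h : ((k : Int) + 1) % 2 == 0
      · rw [if_pos h, if_pos (hpar.mp h)]; push_cast; ring_nf
      · rw [if_neg h, if_neg (fun hh => h (hpar.mpr hh))]; push_cast; ring_nf
    rw [this, ih (k + 1)]; ring_nf

lemma three_mul_cSeq (k : Nat) : 3 * cSeq k = 2 ^ (k + 1) + (-1 : Int) ^ k := by
  induction k with
  | zero => simp [cSeq]
  | succ k ih =>
    simp only [cSeq]
    by_cases h : (k + 1) % 2 = 0
    · have hk : k % 2 = 1 := by omega
      have hodd : Odd k := Nat.odd_iff.mpr hk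
      have heven : Even (k + 1) := by
        rcases hodd with ⟨m, hm⟩; exact ⟨m + 1, by omega⟩
      rw [if_pos (by simpa using h)]
      rw [Even.neg_one_pow heven, Odd.neg_one_pow hodd] at *
      have : (3 : Int) * (cSeq k * 2 + 1) = 2 * (3 * cSeq k) + 3 := by ring
      rw [this, ih]; ring
    · have hk : k % 2 = 0 := by omega
      have heven : Even k := Nat.even_iff.mpr hk
      have hodd : Odd (k + 1) := Even.add_one heven
      rw [if_neg (by simpa using h)]
      rw [Even.neg_one_pow heven, Odd.neg_one_pow hodd] at *
      have : (3 : Int) * (cSeq k * 2 - 1) = 2 * (3 * cSeq k) - 3 := by ring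
      rw [this, ih]; ring

lemma cSeq_closed (k : Nat) :
    cSeq k = PySem.Int.floordiv (2 ^ (k + 1) + (-1 : Int) ^ k) 3 := by
  rw [← three_mul_cSeq k, PySem.Int.floordiv,
    Int.mul_fdiv_cancel_left _ (by norm_num : (3:Int) ≠ 0)]

-- ===== VERDICT (by name: the statement is the Claim_ definition above) =====
lemma paper_key (m : Int) :
    paperLoop (m - 1).toNat 1 1
      = if m < 0 then 1 else PySem.Int.floordiv (2 ^ (m + 1).toNat + (-1 : Int) ^ m.toNat) 3 := by
  have h1 : paperLoop (m - 1).toNat 1 1 = cSeq (1 + (m - 1).toNat) := by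
    have := paperLoop_cSeq (m - 1).toNat 1
    simpa [cSeq] using this
  rw [h1]
  by_cases hneg : m < 0
  · rw [if_pos hneg]
    have : (m - 1).toNat = 0 := by omega
    simp [this, cSeq]
  · rw [if_neg hneg]
    by_cases hz : m = 0
    · subst hz
      decide
    · have hm1 : 1 ≤ m := by omega
      have h2 : 1 + (m - 1).toNat = m.toNat := by omega
      have h3 : (m + 1).toNat = m.toNat + 1 := by omega
      rw [h2, h3, cSeq_closed]

theorem paper_spec : Claim_equal_paper := by
  intro n _
  unfold Spec_paper paper paper_alt
  exact paper_key (PySem.Int.floordiv n 10)
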